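-- pv_equiv track=rewrite | github.com/bh981013/ForifAlgorithm | 완전탐색/모의고사/배병재/main.py | solution
-- ===== SOURCE A (Python) =====
-- def solution(answers):
--     answer = []
--     scores = [0,0,0]
--     ans1 = [1,2,3,4,5]
--     ans2 = [2, 1, 2, 3, 2, 4, 2, 5]
--     ans3 = [3, 3, 1, 1, 2, 2, 4, 4, 5, 5]
--
--     for ind in range(len(answers)):
--         if ans1[ind%5]==answers[ind] :
--             scores[0] += 1
--
--         if ans2[ind%8]==answers[ind] :
--             scores[1] += 1
--
--         if ans3[ind%10]==answers[ind] :
--             scores[2] += 1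
--
--     maxScore = max(scores)
--
--     for i in range (len(scores)):
--         if scores[i] == maxScore:
--             answer.append(i+1)
--     return answer
-- ===== SOURCE B (Python) =====
-- def solution(answers):
--     # Histogram algorithm: one pass builds a frequency table keyed by
--     # (index mod 40, answer) -- 40 = lcm(5, 8, 10) -- then each supervisor's
--     # score is a fixed 40-term table lookup, no per-pattern scan of answers.
--     counts = {}
--     for i, a in enumerate(answers):
--         key = (i % 40, a)
--         counts[key] = counts.get(key, 0) + 1
--     patterns = [[1, 2, 3, 4, 5],
--                 [2, 1, 2, 3, 2, 4, 2, 5],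
--                 [3, 3, 1, 1, 2, 2, 4, 4, 5, 5]]
--     scores = []
--     for pat in patterns:
--         s = 0
--         for r in range(40):
--             s += counts.get((r, pat[r % len(pat)]), 0)
--         scores.append(s)
--     best = max(scores)
--     return [i + 1 for i, s in enumerate(scores) if s == best]
-- ===== Notes on version B (the rewrite author's own statement) =====
-- stated objective: alternative
-- what changed: Replaces A's per-index scan testing each answer against the three cyclic keys with a histogram algorithm: one pass builds a dict counting (index mod 40, answer) pairs (40 = lcm of the pattern lengths), then each score is a fixed 40-term sum of table lookups; scores only depend on this histogram.
import Mathlib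
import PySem

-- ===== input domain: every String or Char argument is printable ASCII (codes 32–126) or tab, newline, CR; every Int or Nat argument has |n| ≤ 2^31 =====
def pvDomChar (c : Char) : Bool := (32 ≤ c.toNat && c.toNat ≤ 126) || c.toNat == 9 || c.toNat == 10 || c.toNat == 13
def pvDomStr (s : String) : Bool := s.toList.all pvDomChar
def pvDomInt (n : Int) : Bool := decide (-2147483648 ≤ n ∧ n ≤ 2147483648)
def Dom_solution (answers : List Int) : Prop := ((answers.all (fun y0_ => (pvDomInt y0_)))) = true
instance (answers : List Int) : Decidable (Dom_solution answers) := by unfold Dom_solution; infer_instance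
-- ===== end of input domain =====

-- B replaces A's per-index scan against the three cyclic keys by a histogram algorithm:
-- one pass builds a dict counting (index mod 40, answer) pairs (40 = lcm 5 8 10), then each
-- score is a fixed 40-term sum of table lookups; same O(n) cost, different algorithm.

-- ===== PORT A =====
def solution (answers : List Int) : List Int :=
  let ans1 : List Int := [1, 2, 3, 4, 5]
  let ans2 : List Int := [2, 1, 2, 3, 2, 4, 2, 5]
  let ans3 : List Int := [3, 3, 1, 1, 2, 2, 4, 4, 5, 5]
  let scores : Int × Int × Int :=
    (PySem.List.pyRange 0 (PySem.List.len answers) 1).foldl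
      (fun (s : Int × Int × Int) ind =>
        let s0 := if PySem.List.pyGetD ans1 (PySem.Int.mod ind 5) 0 = PySem.List.pyGetD answers ind 0 then s.1 + 1 else s.1
        let s1 := if PySem.List.pyGetD ans2 (PySem.Int.mod ind 8) 0 = PySem.List.pyGetD answers ind 0 then s.2.1 + 1 else s.2.1
        let s2 := if PySem.List.pyGetD ans3 (PySem.Int.mod ind 10) 0 = PySem.List.pyGetD answers ind 0 then s.2.2 + 1 else s.2.2
        (s0, s1, s2)) (0, 0, 0)
  let scoresL : List Int := [scores.1, scores.2.1, scores.2.2]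
  let maxScore : Int := ((PySem.List.max? scoresL (fun x => x)).getD 0)
  (PySem.List.pyRange 0 (PySem.List.len scoresL) 1).foldl
    (fun acc i => if PySem.List.pyGetD scoresL i 0 = maxScore then acc ++ [i + 1] else acc) []

-- ===== PORT B =====
def solution_alt (answers : List Int) : List Int :=
  let counts : PySem.Dict (Int × Int) Int :=
    (PySem.List.enumerate answers 0).foldl
      (fun d ia => d.modify (PySem.Int.mod ia.1 40, ia.2) 0 (· + 1)) PySem.Dict.empty
  let patterns : List (List Int) :=
    [[1, 2, 3, 4, 5], [2, 1, 2, 3, 2, 4, 2, 5], [3, 3, 1, 1, 2, 2, 4, 4, 5, 5]]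
  let scores : List Int := patterns.foldl (fun sc pat =>
      sc ++ [(PySem.List.pyRange 0 40 1).foldl
        (fun s r => s + counts.getD (r, PySem.List.pyGetD pat (PySem.Int.mod r (PySem.List.len pat)) 0) 0) 0]) []
  let best : Int := ((PySem.List.max? scores (fun x => x)).getD 0)
  (PySem.List.enumerate scores 0).filterMap
    (fun is => if is.2 = best then some (is.1 + 1) else none)

-- ===== PRECONDITION & SPEC =====
def Spec_solution (answers : List Int) (out : List Int) : Prop := out = solution_alt answers
instance (answers : List Int) (out : List Int) : Decidable (Spec_solution answers out) := by unfold Spec_solution; infer_instance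

-- ===== CLAIM (what is proved, stated in full; the proofs are below) =====
def Claim_equal_solution : Prop := ∀ (answers : List Int), Dom_solution answers → Spec_solution answers (solution answers)

-- ===== LEMMAS AND PROOFS =====

-- A's interleaved loop computes the three countPs.
lemma aScores_countP (answers : List Int) :
    (PySem.List.pyRange 0 (PySem.List.len answers) 1).foldl
      (fun (s : Int × Int × Int) ind =>
        let s0 := if PySem.List.pyGetD [1, 2, 3, 4, 5] (PySem.Int.mod ind 5) 0 = PySem.List.pyGetD answers ind 0 then s.1 + 1 else s.1
        let s1 := if PySem.List.pyGetD [2, 1, 2, 3, 2, 4, 2, 5] (PySem.Int.mod ind 8) 0 = PySem.List.pyGetD answers ind 0 then s.2.1 + 1 else s.2.1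
        let s2 := if PySem.List.pyGetD [3, 3, 1, 1, 2, 2, 4, 4, 5, 5] (PySem.Int.mod ind 10) 0 = PySem.List.pyGetD answers ind 0 then s.2.2 + 1 else s.2.2
        (s0, s1, s2)) ((0 : Int), (0 : Int), (0 : Int))
    = (((PySem.List.enumerate answers 0).countP
          (fun ia => decide (PySem.List.pyGetD [1, 2, 3, 4, 5] (PySem.Int.mod ia.1 5) 0 = ia.2)) : Int),
       ((PySem.List.enumerate answers 0).countP
          (fun ia => decide (PySem.List.pyGetD [2, 1, 2, 3, 2, 4, 2, 5] (PySem.Int.mod ia.1 8) 0 = ia.2)) : Int),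
       ((PySem.List.enumerate answers 0).countP
          (fun ia => decide (PySem.List.pyGetD [3, 3, 1, 1, 2, 2, 4, 4, 5, 5] (PySem.Int.mod ia.1 10) 0 = ia.2)) : Int)) := by
  rw [PySem.List.enumerate_eq_map_pyRange (d := (0:Int))]
  simp only [List.countP_map]
  rw [PySem.List.foldl_prod_mk
    (f := fun (a : Int) ind => if PySem.List.pyGetD [1, 2, 3, 4, 5] (PySem.Int.mod ind 5) 0 = PySem.List.pyGetD answers ind 0 then a + 1 else a)
    (g := fun (s : Int × Int) ind =>
      (if PySem.List.pyGetD [2, 1, 2, 3, 2, 4, 2, 5] (PySem.Int.mod ind 8) 0 = PySem.List.pyGetD answers ind 0 then s.1 + 1 else s.1,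
       if PySem.List.pyGetD [3, 3, 1, 1, 2, 2, 4, 4, 5, 5] (PySem.Int.mod ind 10) 0 = PySem.List.pyGetD answers ind 0 then s.2 + 1 else s.2))]
  rw [PySem.List.foldl_prod_mk
    (f := fun (a : Int) ind => if PySem.List.pyGetD [2, 1, 2, 3, 2, 4, 2, 5] (PySem.Int.mod ind 8) 0 = PySem.List.pyGetD answers ind 0 then a + 1 else a)
    (g := fun (a : Int) ind => if PySem.List.pyGetD [3, 3, 1, 1, 2, 2, 4, 4, 5, 5] (PySem.Int.mod ind 10) 0 = PySem.List.pyGetD answers ind 0 then a + 1 else a)]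
  simp only [PySem.List.foldl_ite_add_one, zero_add, Function.comp_def]

-- B's histogram lookup: the counter dict built over the keyed enumeration counts keys.
lemma counts_getD (answers : List Int) (k : Int × Int) :
    ((PySem.List.enumerate answers 0).foldl
      (fun d ia => d.modify (PySem.Int.mod ia.1 40, ia.2) 0 (· + 1)) PySem.Dict.empty).getD k 0
    = (((PySem.List.enumerate answers 0).map (fun ia => (PySem.Int.mod ia.1 40, ia.2))).count k : Int) := by
  rw [← List.foldl_map (f := fun ia : Int × Int => (PySem.Int.mod ia.1 40, ia.2))
        (g := fun (d : PySem.Dict (Int × Int) Int) x => d.modify x 0 (· + 1))]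
  rw [PySem.Dict.getD_foldl_modify_add_one]
  simp [PySem.Dict.getD_empty]

-- summing counts over a duplicate-free key list counts membership
lemma sum_count {β : Type} [BEq β] [LawfulBEq β] [DecidableEq β] (ks : List β) (hnd : ks.Nodup) (m : List β) :
    (ks.map (fun k => (m.count k : Int))).sum
      = (m.countP (fun a => decide (a ∈ ks)) : Int) := by
  induction m with
  | nil => simp
  | cons x m ih =>
    simp only [List.count_cons, List.countP_cons]
    push_cast
    rw [PySem.List.sum_map_add_int ks (fun k => (m.count k : Int))
          (fun k => if x == k then 1 else 0), ih]
    have hcount : (ks.map fun k => if x == k then (1:Int) else 0).sum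
        = ((ks.count x : Nat) : Int) := by
      rw [PySem.List.sum_map_ite_one_zero (fun k => x == k) ks]
      rw [List.countP_congr (l := ks) (p := fun k => x == k) (q := fun k => k == x)
            (fun a _ => by simp only [beq_iff_eq]; exact eq_comm)]
      rw [List.count_eq_countP]
    rw [hcount]
    by_cases h : x ∈ ks
    · simp [List.count_eq_one_of_mem hnd h, h]
    · simp [List.count_eq_zero_of_not_mem h, h]

-- membership of a pair in the graph of g over a list
lemma pair_mem_graph {g : Int → Int} (rs : List Int) (j v : Int) :
    ((j, v) ∈ rs.map (fun r => (r, g r))) ↔ j ∈ rs ∧ g j = v := by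
  constructor
  · intro h
    rcases List.mem_map.mp h with ⟨r, hr, he⟩
    cases he
    exact ⟨hr, rfl⟩
  · rintro ⟨hj, hv⟩
    exact List.mem_map.mpr ⟨j, hj, by simp [hv]⟩

-- per-pattern: B's 40-term histogram sum is the countP over the enumeration
lemma bScore_eq (answers pat : List Int) (hpos : (0:Int) < PySem.List.len pat)
    (hdvd : PySem.List.len pat ∣ 40) :
    (PySem.List.pyRange 0 40 1).foldl
      (fun s r => s + ((PySem.List.enumerate answers 0).foldl
          (fun d ia => d.modify (PySem.Int.mod ia.1 40, ia.2) 0 (· + 1)) PySem.Dict.empty).getD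
            (r, PySem.List.pyGetD pat (PySem.Int.mod r (PySem.List.len pat)) 0) 0) 0
    = ((PySem.List.enumerate answers 0).countP
        (fun ia => decide (PySem.List.pyGetD pat (PySem.Int.mod ia.1 (PySem.List.len pat)) 0 = ia.2)) : Int) := by
  rw [PySem.List.foldl_add]
  simp only [counts_getD, zero_add]
  rw [show (fun r => (((PySem.List.enumerate answers 0).map
          (fun ia => (PySem.Int.mod ia.1 40, ia.2))).count
            (r, PySem.List.pyGetD pat (PySem.Int.mod r (PySem.List.len pat)) 0) : Int))
        = (fun k => (((PySem.List.enumerate answers 0).map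
            (fun ia => (PySem.Int.mod ia.1 40, ia.2))).count k : Int))
          ∘ (fun r => (r, PySem.List.pyGetD pat (PySem.Int.mod r (PySem.List.len pat)) 0)) from rfl,
     ← List.map_map]
  have hnd : ((PySem.List.pyRange 0 40 1).map
      (fun r => (r, PySem.List.pyGetD pat (PySem.Int.mod r (PySem.List.len pat)) 0))).Nodup := by
    refine List.Nodup.map ?_ (PySem.List.nodup_pyRange_one 0 40)
    intro a b h
    simpa using congrArg Prod.fst h
  rw [sum_count _ hnd, List.countP_map]
  congr 1
  apply List.countP_congr
  intro ia _
  simp only [Function.comp, decide_eq_true_eq]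
  have h40 : PySem.Int.mod ia.1 40 = ia.1 % 40 := PySem.Int.mod_eq_emod_of_pos (by norm_num)
  constructor
  · intro hmem
    rcases (pair_mem_graph _ _ _).mp hmem with ⟨_, hv⟩
    rw [← hv, h40]
    congr 1
    rw [PySem.Int.mod_eq_emod_of_pos hpos, PySem.Int.mod_eq_emod_of_pos hpos,
        Int.emod_emod_of_dvd _ hdvd]
  · intro hv
    apply (pair_mem_graph _ _ _).mpr
    constructor
    · rw [PySem.List.mem_pyRange_one, h40]
      exact ⟨Int.emod_nonneg _ (by norm_num), Int.emod_lt_of_pos _ (by norm_num)⟩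
    · rw [← hv, h40]
      congr 1
      rw [PySem.Int.mod_eq_emod_of_pos hpos, PySem.Int.mod_eq_emod_of_pos hpos,
          Int.emod_emod_of_dvd _ hdvd]

-- the tail computations agree on any 3-element score list
lemma tail_eq (c0 c1 c2 m : Int) :
    (PySem.List.pyRange 0 (PySem.List.len [c0, c1, c2]) 1).foldl
      (fun acc i => if PySem.List.pyGetD [c0, c1, c2] i 0 = m then acc ++ [i + 1] else acc) []
    = (PySem.List.enumerate [c0, c1, c2] 0).filterMap
        (fun is => if is.2 = m then some (is.1 + 1) else none) := by
  have hl : PySem.List.len [c0, c1, c2] = 3 := by simp [PySem.List.len_eq]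
  have h : PySem.List.pyRange 0 3 1 = [0, 1, 2] := by decide
  rw [hl, h]
  simp only [List.foldl, PySem.List.enumerate_cons, PySem.List.enumerate_nil, List.filterMap]
  rw [show PySem.List.pyGetD [c0, c1, c2] 0 0 = c0 from rfl,
      show PySem.List.pyGetD [c0, c1, c2] 1 0 = c1 from rfl,
      show PySem.List.pyGetD [c0, c1, c2] 2 0 = c2 from rfl]
  norm_num
  split_ifs <;> rfl

-- ===== VERDICT (by name: the statement is the Claim_ definition above) =====
theorem solution_spec : Claim_equal_solution := by
  intro answers _
  show solution answers = solution_alt answers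
  unfold solution solution_alt
  simp only [List.foldl, aScores_countP]
  simp only [bScore_eq answers [1, 2, 3, 4, 5] (by decide) (by decide),
      bScore_eq answers [2, 1, 2, 3, 2, 4, 2, 5] (by decide) (by decide),
      bScore_eq answers [3, 3, 1, 1, 2, 2, 4, 4, 5, 5] (by decide) (by decide)]
  norm_num [PySem.List.len_eq]
  exact tail_eq _ _ _ _
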